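-- pv_equiv track=rewrite | github.com/patell11/DataStructuresAndAlgorithms_SanDiego | Practice/Coursera_Problems/primitive_calculator.py | constructSequenceHelper
-- ===== SOURCE A (Python) =====
-- def constructSequenceHelper(num_ops, n):
--     sequence = []
--     while n > 0:
--         sequence.append(n)
--         if n % 2 != 0 and n % 3 != 0:
--             n = n-1
--         elif n % 2 == 0 and n % 3 == 0:
--             n = n//3
--         elif n % 2 == 0:
--             if num_ops[n-1] < num_ops[n//2]:
--                 n = n-1
--             else:
--                 n = n//2
--         elif n % 3 == 0:
--             if num_ops[n-1] < num_ops[n//3]: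
--                 n = n -1
--             else:
--                 n = n//3
--     sequence= list(reversed(sequence))
--     return sequence
-- ===== SOURCE B (Python) =====
-- def _predecessor(num_ops, n):
--     # identical branch logic to the original, factored out
--     if n % 2 != 0 and n % 3 != 0:
--         return n - 1
--     elif n % 2 == 0 and n % 3 == 0:
--         return n // 3
--     elif n % 2 == 0:
--         if num_ops[n-1] < num_ops[n//2]:
--             return n - 1
--         else:
--             return n // 2
--     elif n % 3 == 0:
--         if num_ops[n-1] < num_ops[n//3]:
--             return n - 1
--         else:
--             return n // 3
--
--
-- def _build(num_ops, n):
--     if n <= 0: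
--         return []
--     return _build(num_ops, _predecessor(num_ops, n)) + [n]
--
--
-- def constructSequenceHelper(num_ops, n):
--     return _build(num_ops, n)
-- ===== Notes on version B (the rewrite author's own statement) =====
-- stated objective: alternative
-- what changed: The predecessor rule (same verbatim branches) is factored into a helper and the sequence is built in forward order by recursion build(pred(n)) + [n], replacing A's while-loop with an accumulator list that is appended to and reversed at the end.
-- outside the precondition, e.g. on constructSequenceHelper([5, 5], 7): A returns [1, 2, 6, 7], B returns [1, 2, 6, 7]
import Mathlib
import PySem

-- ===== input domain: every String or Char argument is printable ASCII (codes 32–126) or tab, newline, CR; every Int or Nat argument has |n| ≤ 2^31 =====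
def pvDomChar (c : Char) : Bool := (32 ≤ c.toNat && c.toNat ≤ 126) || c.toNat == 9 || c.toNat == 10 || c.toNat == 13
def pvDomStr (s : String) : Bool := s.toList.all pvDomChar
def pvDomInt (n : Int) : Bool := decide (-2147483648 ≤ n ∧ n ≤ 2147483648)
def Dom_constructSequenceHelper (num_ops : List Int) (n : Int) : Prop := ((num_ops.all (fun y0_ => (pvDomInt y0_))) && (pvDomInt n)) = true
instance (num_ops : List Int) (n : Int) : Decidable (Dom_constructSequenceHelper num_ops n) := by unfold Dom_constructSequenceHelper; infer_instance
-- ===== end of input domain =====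

-- B factors the identical predecessor rule into a helper and builds the sequence in forward
-- order by recursion (build(pred(n)) + [n]) instead of A's append-then-reverse while loop.

-- termination helpers for the ports (cited by the decreasing_by proofs)
lemma pvFd2_toNat_lt {n : Int} (h : 0 < n) : (PySem.Int.floordiv n 2).toNat < n.toNat := by
  rw [PySem.Int.floordiv_eq_ediv_of_pos (by omega : (0:Int) < 2)]; omega

lemma pvFd3_toNat_lt {n : Int} (h : 0 < n) : (PySem.Int.floordiv n 3).toNat < n.toNat := by
  rw [PySem.Int.floordiv_eq_ediv_of_pos (by omega : (0:Int) < 3)]; omega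

-- ===== PORT A =====
-- A's while loop, step for step; `sequence` is the accumulator.
-- num_ops[...] is pyGet?; on IndexError (none, excluded by Pre_) the port stops with the accumulator.
def pvAloop (num_ops : List Int) (n : Int) (sequence : List Int) : List Int :=
  if hn : 0 < n then
    let seq2 := sequence ++ [n]
    if PySem.Int.mod n 2 ≠ 0 ∧ PySem.Int.mod n 3 ≠ 0 then
      pvAloop num_ops (n - 1) seq2
    else if PySem.Int.mod n 2 = 0 ∧ PySem.Int.mod n 3 = 0 then
      pvAloop num_ops (PySem.Int.floordiv n 3) seq2
    else if PySem.Int.mod n 2 = 0 then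
      match PySem.List.pyGet? num_ops (n - 1), PySem.List.pyGet? num_ops (PySem.Int.floordiv n 2) with
      | some a, some b =>
          if a < b then pvAloop num_ops (n - 1) seq2
          else pvAloop num_ops (PySem.Int.floordiv n 2) seq2
      | _, _ => seq2
    else if PySem.Int.mod n 3 = 0 then
      match PySem.List.pyGet? num_ops (n - 1), PySem.List.pyGet? num_ops (PySem.Int.floordiv n 3) with
      | some a, some b =>
          if a < b then pvAloop num_ops (n - 1) seq2
          else pvAloop num_ops (PySem.Int.floordiv n 3) seq2
      | _, _ => seq2
    else seq2  -- unreachable: for n > 0 one of Python's if/elif branches always fires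
  else sequence
termination_by n.toNat
decreasing_by
  · omega
  · exact pvFd3_toNat_lt hn
  · omega
  · exact pvFd2_toNat_lt hn
  · omega
  · exact pvFd3_toNat_lt hn

def constructSequenceHelper (num_ops : List Int) (n : Int) : List Int :=
  (pvAloop num_ops n []).reverse

-- ===== PORT B =====
-- the factored-out predecessor rule; none = IndexError in the Python (excluded by Pre_)
def pvPredecessor (num_ops : List Int) (n : Int) : Option Int :=
  if PySem.Int.mod n 2 ≠ 0 ∧ PySem.Int.mod n 3 ≠ 0 then some (n - 1)
  else if PySem.Int.mod n 2 = 0 ∧ PySem.Int.mod n 3 = 0 then some (PySem.Int.floordiv n 3)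
  else if PySem.Int.mod n 2 = 0 then
    match PySem.List.pyGet? num_ops (n - 1), PySem.List.pyGet? num_ops (PySem.Int.floordiv n 2) with
    | some a, some b => some (if a < b then n - 1 else PySem.Int.floordiv n 2)
    | _, _ => none
  else if PySem.Int.mod n 3 = 0 then
    match PySem.List.pyGet? num_ops (n - 1), PySem.List.pyGet? num_ops (PySem.Int.floordiv n 3) with
    | some a, some b => some (if a < b then n - 1 else PySem.Int.floordiv n 3)
    | _, _ => none
  else none

lemma pvPredecessor_toNat_lt {num_ops : List Int} {n m : Int} (hn : 0 < n)
    (h : pvPredecessor num_ops n = some m) : m.toNat < n.toNat := by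
  unfold pvPredecessor at h
  split_ifs at h with h1 h2 h3 h4
  · cases h; omega
  · cases h; exact pvFd3_toNat_lt hn
  · revert h
    cases PySem.List.pyGet? num_ops (n - 1) <;> cases PySem.List.pyGet? num_ops (PySem.Int.floordiv n 2) <;>
      intro h <;> simp at h
    rw [← h]; split <;> omega
  · revert h
    cases PySem.List.pyGet? num_ops (n - 1) <;> cases PySem.List.pyGet? num_ops (PySem.Int.floordiv n 3) <;>
      intro h <;> simp at h
    rw [← h]; split <;> omega

-- build(n): [] for n <= 0, else build(predecessor(n)) + [n] — forward order, no reverse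
def pvBuild (num_ops : List Int) (n : Int) : List Int :=
  if n ≤ 0 then []
  else
    match h : pvPredecessor num_ops n with
    | some m => pvBuild num_ops m ++ [n]
    | none => []  -- Python raises here (outside Pre_)
termination_by n.toNat
decreasing_by exact pvPredecessor_toNat_lt (by omega) h

def constructSequenceHelper_alt (num_ops : List Int) (n : Int) : List Int :=
  pvBuild num_ops n

-- ===== PRECONDITION & SPEC =====
-- Pre_ restricts to the helper's natural domain n ≤ len(num_ops) (plus the trivial n ≤ 1):
-- the DP table must cover the chain's indices, otherwise A's num_ops[...] lookups raise
-- IndexError on almost every input; on the rare larger n whose chain happens to avoid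
-- indexing (the cited example) A returns and B returns the same value.
def Pre_constructSequenceHelper (num_ops : List Int) (n : Int) : Prop :=
  n ≤ 1 ∨ n ≤ (num_ops.length : Int)
instance (num_ops : List Int) (n : Int) : Decidable (Pre_constructSequenceHelper num_ops n) := by
  unfold Pre_constructSequenceHelper; infer_instance

def pvWitness_constructSequenceHelper : List Int × Int := ([0, 1, 2, 3, 4, 5], 5)

def Spec_constructSequenceHelper (num_ops : List Int) (n : Int) (out : List Int) : Prop := out = constructSequenceHelper_alt num_ops n
instance (num_ops : List Int) (n : Int) (out : List Int) : Decidable (Spec_constructSequenceHelper num_ops n out) := by unfold Spec_constructSequenceHelper; infer_instance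

-- ===== CLAIM (what is proved, stated in full; the proofs are below) =====
def Claim_equal_constructSequenceHelper : Prop := ∀ (num_ops : List Int) (n : Int), Dom_constructSequenceHelper num_ops n → Pre_constructSequenceHelper num_ops n → Spec_constructSequenceHelper num_ops n (constructSequenceHelper num_ops n)

-- ===== LEMMAS AND PROOFS =====

lemma pvBuild_step {num_ops : List Int} {n m : Int} (hn : 0 < n)
    (h : pvPredecessor num_ops n = some m) :
    pvBuild num_ops n = pvBuild num_ops m ++ [n] := by
  rw [pvBuild, if_neg (show ¬ n ≤ 0 by omega)]
  split <;> simp_all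

lemma pvLoop_eq (num_ops : List Int) :
    ∀ (N : Nat) (n : Int), n.toNat ≤ N → (n ≤ 1 ∨ n ≤ (num_ops.length : Int)) →
    ∀ seq : List Int, (pvAloop num_ops n seq).reverse = pvBuild num_ops n ++ seq.reverse := by
  intro N
  induction N with
  | zero =>
    intro n hN hpre seq
    have hn : ¬ 0 < n := by omega
    rw [pvAloop, pvBuild]
    simp [hn, show n ≤ 0 by omega]
  | succ N ih =>
    intro n hN hpre seq
    by_cases hn : 0 < n
    · have hstep : ∀ m : Int, 0 ≤ m → m < n → (m ≤ 1 ∨ m ≤ (num_ops.length : Int)) := by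
        intro m h0 hlt
        rcases hpre with h | h
        · left; omega
        · right; omega
      rw [pvAloop, dif_pos hn]
      by_cases c2 : PySem.Int.mod n 2 = 0 <;> by_cases c3 : PySem.Int.mod n 3 = 0
      · -- n % 2 == 0 and n % 3 == 0 : n//3, unconditionally
        have hfd3 : PySem.Int.floordiv n 3 = n / 3 := PySem.Int.floordiv_eq_ediv_of_pos (by omega)
        have hpred : pvPredecessor num_ops n = some (PySem.Int.floordiv n 3) := by
          unfold pvPredecessor
          rw [if_neg (fun hc => hc.1 c2), if_pos ⟨c2, c3⟩]
        rw [if_neg (fun hc => hc.1 c2), if_pos ⟨c2, c3⟩,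
          ih _ (by rw [hfd3]; omega) (hstep _ (by rw [hfd3]; omega) (by rw [hfd3]; omega)) _,
          pvBuild_step hn hpred]
        simp
      · -- n % 2 == 0, n % 3 != 0 : compare num_ops[n-1] with num_ops[n//2]
        have hd2 : (2:Int) ∣ n := (PySem.Int.mod_eq_zero_iff_dvd n 2).mp c2
        have hlen : n ≤ (num_ops.length : Int) := by rcases hpre with h | h <;> omega
        have hfd2 : PySem.Int.floordiv n 2 = n / 2 := PySem.Int.floordiv_eq_ediv_of_pos (by omega)
        have ha := PySem.List.pyGet?_eq_some_getElem (xs := num_ops) (i := n - 1)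
          (by omega) (by omega)
        have hb := PySem.List.pyGet?_eq_some_getElem (xs := num_ops) (i := PySem.Int.floordiv n 2)
          (by rw [hfd2]; omega) (by rw [hfd2]; omega)
        rw [if_neg (fun hc => hc.1 c2), if_neg (fun hc => c3 hc.2), if_pos c2]
        simp only [ha, hb]
        by_cases hab : num_ops[(n - 1).toNat] < num_ops[(PySem.Int.floordiv n 2).toNat]
        · have hpred : pvPredecessor num_ops n = some (n - 1) := by
            unfold pvPredecessor
            rw [if_neg (fun hc => hc.1 c2), if_neg (fun hc => c3 hc.2), if_pos c2, ha, hb]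
            exact congrArg some (if_pos hab)
          rw [if_pos hab,
            ih _ (by omega) (hstep _ (by omega) (by omega)) _,
            pvBuild_step hn hpred]
          simp
        · have hpred : pvPredecessor num_ops n = some (PySem.Int.floordiv n 2) := by
            unfold pvPredecessor
            rw [if_neg (fun hc => hc.1 c2), if_neg (fun hc => c3 hc.2), if_pos c2, ha, hb]
            exact congrArg some (if_neg hab)
          rw [if_neg hab,
            ih _ (by rw [hfd2]; omega) (hstep _ (by rw [hfd2]; omega) (by rw [hfd2]; omega)) _,
            pvBuild_step hn hpred]
          simp
      · -- n % 2 != 0, n % 3 == 0 : compare num_ops[n-1] with num_ops[n//3]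
        have hd3 : (3:Int) ∣ n := (PySem.Int.mod_eq_zero_iff_dvd n 3).mp c3
        have hn1 : n ≠ 1 := by rintro rfl; exact absurd c3 (by decide)
        have hlen : n ≤ (num_ops.length : Int) := by rcases hpre with h | h <;> omega
        have hfd3 : PySem.Int.floordiv n 3 = n / 3 := PySem.Int.floordiv_eq_ediv_of_pos (by omega)
        have ha := PySem.List.pyGet?_eq_some_getElem (xs := num_ops) (i := n - 1)
          (by omega) (by omega)
        have hb := PySem.List.pyGet?_eq_some_getElem (xs := num_ops) (i := PySem.Int.floordiv n 3)
          (by rw [hfd3]; omega) (by rw [hfd3]; omega)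
        rw [if_neg (fun hc => hc.2 c3), if_neg (fun hc => c2 hc.1), if_neg c2, if_pos c3]
        simp only [ha, hb]
        by_cases hab : num_ops[(n - 1).toNat] < num_ops[(PySem.Int.floordiv n 3).toNat]
        · have hpred : pvPredecessor num_ops n = some (n - 1) := by
            unfold pvPredecessor
            rw [if_neg (fun hc => hc.2 c3), if_neg (fun hc => c2 hc.1), if_neg c2, if_pos c3, ha, hb]
            exact congrArg some (if_pos hab)
          rw [if_pos hab,
            ih _ (by omega) (hstep _ (by omega) (by omega)) _,
            pvBuild_step hn hpred]
          simp
        · have hpred : pvPredecessor num_ops n = some (PySem.Int.floordiv n 3) := by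
            unfold pvPredecessor
            rw [if_neg (fun hc => hc.2 c3), if_neg (fun hc => c2 hc.1), if_neg c2, if_pos c3, ha, hb]
            exact congrArg some (if_neg hab)
          rw [if_neg hab,
            ih _ (by rw [hfd3]; omega) (hstep _ (by rw [hfd3]; omega) (by rw [hfd3]; omega)) _,
            pvBuild_step hn hpred]
          simp
      · -- n % 2 != 0 and n % 3 != 0 : n - 1
        have hpred : pvPredecessor num_ops n = some (n - 1) := by
          unfold pvPredecessor
          rw [if_pos ⟨c2, c3⟩]
        rw [if_pos ⟨c2, c3⟩,
          ih _ (by omega) (hstep _ (by omega) (by omega)) _,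
          pvBuild_step hn hpred]
        simp
    · rw [pvAloop, pvBuild]
      simp [hn, show n ≤ 0 by omega]

-- ===== VERDICT (by name: the statement is the Claim_ definition above) =====
theorem constructSequenceHelper_spec : Claim_equal_constructSequenceHelper := by
  intro num_ops n _ hpre
  unfold Spec_constructSequenceHelper constructSequenceHelper constructSequenceHelper_alt
  simpa using pvLoop_eq num_ops n.toNat n le_rfl hpre []
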